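-- pv_equiv track=rewrite | github.com/jomunlak/ThisIsCodingTest_withPython | DFS, BFS_괄호 변환.py | solution
-- ===== SOURCE A (Python) =====
-- def getCorrect(u):
--     stk = []
--     for i in u:
--
--         if i =="(":
--             stk.append(i)
--         else:
--             if len(stk) == 0:
--                 return False
--             else:
--                 stk.pop()
--
--     return True
--
-- def getReverse(u):
--     result = ""
--     for i in u:
--         if i == "(":
--             result += ')'
--         else:
--             result += "("
--     return result
--
-- def solution(p):
--
--     answer = ''
--
--     if p =="":
--         return ""
--
--     tmp = p[0]
--     countA = 1 # 제일 첫번째 괄호의 개수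
--     countB = 0 # 첫번째 괄호의 반대 괄호의 개수
--      # 가장 처음 만들어지는 균형잡힌 문자열을 구하는 코드
--     for i in range(1, len(p)):
--         if tmp == p[i]:
--             countA += 1
--         else:
--             countB += 1
--         if countA == countB:
--             # 두 종류의 괄호의 수가 같아지는 가장 짧은 문자열 구하기
--             break
--
--     u = p[:countA+countB] # 더이상 균형잡힌 문자열로 나뉘지 않는 균형잡힌 문자열
--     v = p[countA+countB:]
--
--     if getCorrect(u):
--         answer += u + solution(v)
--     else:
--         answer += '('
--         answer += solution(v)
--         answer += ')'
--         answer += getReverse(u[1:len(u)-1])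
--
--     return answer
-- ===== SOURCE B (Python) =====
-- def solution(p):
--     # Iterative one-pass version: explicit front/back accumulators instead of
--     # recursion, fused split/validity scan by index instead of slicing+stack.
--     n = len(p)
--     front = []
--     back = []
--     i = 0
--     while i < n:
--         first = p[i]
--         bal = 0
--         cnt = 0
--         good = True
--         j = i
--         while j < n:
--             c = p[j]
--             bal += 1 if c == first else -1
--             if c == '(':
--                 cnt += 1
--             elif cnt == 0:
--                 good = False
--             else:
--                 cnt -= 1
--             j += 1
--             if bal == 0:
--                 break
--         u = p[i:j]
--         if good:
--             front.append(u)
--         else: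
--             front.append('(')
--             back.append(')' + ''.join(')' if c == '(' else '(' for c in u[1:-1]))
--         i = j
--     return ''.join(front) + ''.join(reversed(back))
-- ===== Notes on version B (the rewrite author's own statement) =====
-- stated objective: faster
-- what changed: Replaced the recursion with string slicing, a character stack and repeated string concatenation by a single iterative left-to-right pass: a fused index scan finds each irreducible segment and checks its validity with one counter at once, and the output is assembled from front/back segment lists joined once at the end.
import Mathlib
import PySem

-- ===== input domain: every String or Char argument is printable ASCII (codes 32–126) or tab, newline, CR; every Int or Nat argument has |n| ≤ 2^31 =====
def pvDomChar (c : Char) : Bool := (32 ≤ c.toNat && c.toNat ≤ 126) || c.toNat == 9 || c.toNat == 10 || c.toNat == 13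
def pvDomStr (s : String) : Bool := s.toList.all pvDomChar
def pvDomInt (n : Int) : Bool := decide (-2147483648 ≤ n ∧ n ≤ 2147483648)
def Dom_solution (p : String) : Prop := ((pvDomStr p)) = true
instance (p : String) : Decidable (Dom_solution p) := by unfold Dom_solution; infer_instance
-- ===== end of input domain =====

-- B replaces A's recursion-with-slicing by one iterative pass with front/back
-- accumulators and a fused split/validity scan (objective: faster).

-- ===== PORT A =====
-- A's getCorrect: stack of '(' chars, pop on any other char, fail on empty pop.
def getCorrectLoop (stk : List Char) : List Char → Bool
  | [] => true
  | c :: rest =>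
    if c = '(' then getCorrectLoop (stk.concat c) rest
    else if stk.length = 0 then false
    else getCorrectLoop stk.dropLast rest

def getCorrect (u : List Char) : Bool := getCorrectLoop [] u

-- A's getReverse: result string built by repeated concatenation.
def getReverseA (u : List Char) : List Char :=
  u.foldl (fun r c => r ++ [if c = '(' then ')' else '(']) []

-- A's first loop: countA/countB with early break when they become equal.
def splitLoop (tmp : Char) (cA cB : Nat) : List Char → Nat × Nat
  | [] => (cA, cB)
  | c :: rest =>
    let cA' := if c = tmp then cA + 1 else cA
    let cB' := if c = tmp then cB else cB + 1
    if cA' = cB' then (cA', cB') else splitLoop tmp cA' cB' rest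

theorem splitLoop_fst_ge (tmp : Char) (rest : List Char) :
    ∀ cA cB, cA ≤ (splitLoop tmp cA cB rest).1 := by
  induction rest with
  | nil => intro cA cB; simp [splitLoop]
  | cons c rs ih =>
    intro cA cB
    simp only [splitLoop]
    split_ifs <;> first | simp | (exact le_trans (by omega) (ih _ _))

def solutionList : List Char → List Char
  | [] => []
  | tmp :: rest =>
    let s := splitLoop tmp 1 0 rest
    let k := s.1 + s.2
    let u := (tmp :: rest).take k
    let v := (tmp :: rest).drop k
    if getCorrect u then u ++ solutionList v
    else '(' :: (solutionList v ++ ')' :: getReverseA ((u.drop 1).take (u.length - 2)))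
termination_by p => p.length
decreasing_by
  all_goals
    simp only [List.length_drop, List.length_cons]
    have h1 : 1 ≤ (splitLoop tmp 1 0 rest).1 := splitLoop_fst_ge tmp rest 1 0
    omega

def solution (p : String) : String := String.ofList (solutionList p.toList)

-- ===== PORT B =====
-- B's fused inner scan: returns (chars consumed, segment validity).
def scanB (first : Char) (bal : Int) (cnt : Nat) (good : Bool) (k : Nat) :
    List Char → Nat × Bool
  | [] => (k, good)
  | c :: rest =>
    let bal' := if c = first then bal + 1 else bal - 1
    let st : Nat × Bool :=
      if c = '(' then (cnt + 1, good) else if cnt = 0 then (cnt, false) else (cnt - 1, good)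
    if bal' = 0 then (k + 1, st.2) else scanB first bal' st.1 st.2 (k + 1) rest

theorem scanB_fst_ge (first : Char) (l : List Char) :
    ∀ bal cnt good k, k ≤ (scanB first bal cnt good k l).1 := by
  induction l with
  | nil => intro bal cnt good k; simp [scanB]
  | cons c rs ih =>
    intro bal cnt good k
    simp only [scanB]
    split_ifs <;>
      first
        | (dsimp only; omega)
        | exact Nat.le_trans (Nat.le_succ k) (ih _ _ _ _)

theorem scanB_fst_lt (first c : Char) (rest : List Char) (bal : Int) (cnt : Nat)
    (good : Bool) (k : Nat) : k < (scanB first bal cnt good k (c :: rest)).1 := by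
  simp only [scanB]
  split_ifs <;>
    first
      | (dsimp only; omega)
      | exact Nat.lt_of_lt_of_le (Nat.lt_succ_self k) (scanB_fst_ge _ _ _ _ _ _)

-- B's outer loop: front/back lists of segments.
def loopB : List Char → List (List Char) → List (List Char) → List Char
  | [], front, back => front.flatten ++ back.reverse.flatten
  | first :: rest, front, back =>
    let r := scanB first 0 0 true 0 (first :: rest)
    let u := (first :: rest).take r.1
    if r.2 then loopB ((first :: rest).drop r.1) (front ++ [u]) back
    else loopB ((first :: rest).drop r.1) (front ++ [['(']])
      (back ++ [')' :: ((u.drop 1).take (u.length - 2)).map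
        (fun c => if c = '(' then ')' else '(')])
termination_by p _ _ => p.length
decreasing_by
  all_goals
    simp only [List.length_drop, List.length_cons]
    have h1 : 0 < (scanB first 0 0 true 0 (first :: rest)).1 :=
      scanB_fst_lt first first rest 0 0 true 0
    omega

def solution_alt (p : String) : String := String.ofList (loopB p.toList [] [])

-- ===== PRECONDITION & SPEC =====
def Spec_solution (p : String) (out : String) : Prop := out = solution_alt p
instance (p : String) (out : String) : Decidable (Spec_solution p out) := by unfold Spec_solution; infer_instance

-- ===== CLAIM (what is proved, stated in full; the proofs are below) =====
def Claim_equal_solution : Prop := ∀ (p : String), Dom_solution p → Spec_solution p (solution p)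

-- ===== LEMMAS AND PROOFS =====

-- A's getReverse builds by repeated append: it is a map.
theorem getReverseA_eq_map (u : List Char) :
    getReverseA u = u.map (fun c => if c = '(' then ')' else '(') := by
  simp only [getReverseA, PySem.List.foldl_append_singleton_eq_map, List.nil_append]

-- common spec of the two split scans: length of the shortest prefix on which the
-- running (±1) balance (started at `bal`) hits 0, or the whole list.
def splitLen (first : Char) (bal : Int) : List Char → Nat
  | [] => 0
  | c :: rest =>
    let bal' := if c = first then bal + 1 else bal - 1
    if bal' = 0 then 1 else 1 + splitLen first bal' rest

theorem splitLoop_sum (tmp : Char) (rest : List Char) :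
    ∀ cA cB : Nat,
      (splitLoop tmp cA cB rest).1 + (splitLoop tmp cA cB rest).2
        = cA + cB + splitLen tmp ((cA : Int) - (cB : Int)) rest := by
  induction rest with
  | nil => intro cA cB; simp [splitLoop, splitLen]
  | cons c rs ih =>
    intro cA cB
    simp only [splitLoop, splitLen]
    by_cases hc : c = tmp
    · have hiff : (cA + 1 = cB) ↔ ((cA : Int) - (cB : Int) + 1 = 0) := by omega
      by_cases h0 : (cA : Int) - (cB : Int) + 1 = 0
      · simp [hc, hiff.mpr h0, h0]
        omega
      · have h1 : ¬ (cA + 1 = cB) := fun h => h0 (hiff.mp h)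
        simp only [hc, if_true, h1, if_false, h0]
        rw [ih]
        push_cast
        ring_nf
    · have hiff : (cA = cB + 1) ↔ ((cA : Int) - (cB : Int) - 1 = 0) := by omega
      by_cases h0 : (cA : Int) - (cB : Int) - 1 = 0
      · simp [hc, hiff.mpr h0]
        omega
      · have h1 : ¬ (cA = cB + 1) := fun h => h0 (hiff.mp h)
        simp only [hc, if_false, h1, h0]
        rw [ih]
        push_cast
        ring_nf

theorem scanB_fst_eq (first : Char) (rest : List Char) :
    ∀ (bal : Int) (cnt : Nat) (good : Bool) (k : Nat),
      (scanB first bal cnt good k rest).1 = k + splitLen first bal rest := by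
  induction rest with
  | nil => intro bal cnt good k; simp [scanB, splitLen]
  | cons c rs ih =>
    intro bal cnt good k
    simp only [scanB, splitLen]
    by_cases h0 : (if c = first then bal + 1 else bal - 1) = 0
    · simp [h0]
    · simp only [h0, if_false]
      rw [ih]
      omega

theorem scanB_snd_false (first : Char) (rest : List Char) :
    ∀ (bal : Int) (cnt : Nat) (k : Nat),
      (scanB first bal cnt false k rest).2 = false := by
  induction rest with
  | nil => intro bal cnt k; simp [scanB]
  | cons c rs ih =>
    intro bal cnt k
    simp only [scanB]
    split_ifs <;> first | rfl | exact ih _ _ _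

theorem scanB_snd_eq (first : Char) (rest : List Char) :
    ∀ (bal : Int) (cnt : Nat) (k : Nat) (stk : List Char), stk.length = cnt →
      (scanB first bal cnt true k rest).2
        = getCorrectLoop stk (rest.take (splitLen first bal rest)) := by
  induction rest with
  | nil => intro bal cnt k stk _; simp [scanB, splitLen, getCorrectLoop]
  | cons c rs ih =>
    intro bal cnt k stk hstk
    simp only [scanB, splitLen]
    by_cases h0 : (if c = first then bal + 1 else bal - 1) = 0
    · simp only [h0, if_true]
      by_cases hp : c = '('
      · simp [hp, getCorrectLoop]
      · by_cases hcnt : cnt = 0 <;> simp [hp, hcnt, getCorrectLoop, hstk]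
    · simp only [h0, if_false]
      have htake : (c :: rs).take (1 + splitLen first (if c = first then bal + 1 else bal - 1) rs)
          = c :: rs.take (splitLen first (if c = first then bal + 1 else bal - 1) rs) := by
        rw [Nat.add_comm]; simp [List.take_succ_cons]
      rw [htake]
      by_cases hp : c = '('
      · simp only [hp, if_true, getCorrectLoop]
        exact ih _ _ _ (stk.concat '(') (by simp [hstk])
      · by_cases hcnt : cnt = 0
        · simp only [hp, if_false, hcnt, if_true, getCorrectLoop, hstk]
          simp [scanB_snd_false]
        · simp only [hp, if_false, hcnt, getCorrectLoop, hstk]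
          exact ih _ _ _ stk.dropLast (by simp [hstk])

theorem loopB_eq (n : Nat) : ∀ (p : List Char), p.length ≤ n →
    ∀ (front back : List (List Char)),
      loopB p front back = front.flatten ++ solutionList p ++ back.reverse.flatten := by
  induction n with
  | zero =>
    intro p hp front back
    have : p = [] := List.length_eq_zero_iff.mp (Nat.le_zero.mp hp)
    subst this
    simp [loopB, solutionList]
  | succ n ih =>
    intro p hp front back
    match p with
    | [] => simp [loopB, solutionList]
    | first :: rest =>
      have hsum : (splitLoop first 1 0 rest).1 + (splitLoop first 1 0 rest).2
          = 1 + splitLen first 1 rest := by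
        simpa using splitLoop_sum first rest 1 0
      -- one unfolded step of the inner scan
      have hstep : scanB first 0 0 true 0 (first :: rest)
          = if first = '(' then scanB first 1 1 true 1 rest
            else scanB first 1 0 false 1 rest := by
        by_cases h : first = '(' <;> simp [scanB, h]
      have hfst : (scanB first 0 0 true 0 (first :: rest)).1 = 1 + splitLen first 1 rest := by
        rw [hstep]; split_ifs <;> rw [scanB_fst_eq]
      have hsnd : (scanB first 0 0 true 0 (first :: rest)).2
          = getCorrect ((first :: rest).take (1 + splitLen first 1 rest)) := by
        rw [hstep]
        have htake : (first :: rest).take (1 + splitLen first 1 rest)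
            = first :: rest.take (splitLen first 1 rest) := by
          rw [Nat.add_comm]; simp [List.take_succ_cons]
        rw [htake]
        by_cases hp1 : first = '('
        · simp only [hp1, if_true, getCorrect, getCorrectLoop]
          exact scanB_snd_eq '(' rest 1 1 1 ['('] rfl
        · simp only [hp1, if_false, getCorrect, getCorrectLoop, List.length_nil]
          simp [scanB_snd_false]
      have hlen : ((first :: rest).drop (1 + splitLen first 1 rest)).length ≤ n := by
        have hp' : rest.length + 1 ≤ n + 1 := by simpa using hp
        simp only [List.length_drop, List.length_cons]
        omega
      simp only [loopB, solutionList, hfst, hsnd, hsum]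
      cases hgc : getCorrect ((first :: rest).take (1 + splitLen first 1 rest)) with
      | true =>
        rw [if_pos rfl, if_pos rfl, ih _ hlen]
        simp [List.append_assoc]
      | false =>
        rw [if_neg (by simp), if_neg (by simp), ih _ hlen]
        simp [getReverseA_eq_map, List.append_assoc]

-- ===== VERDICT (by name: the statement is the Claim_ definition above) =====
theorem solution_spec : Claim_equal_solution := by
  intro p _
  unfold Spec_solution solution solution_alt
  rw [loopB_eq p.toList.length p.toList le_rfl]
  simp
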